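-- pv_equiv track=rewrite | github.com/dagahan/AMLS | backend/src/math_models/entrance_assessment/graph_artifact.py | _build_ancestor_maps
-- ===== SOURCE A (Python) =====
-- def _build_ancestor_maps(
--     prerequisites_by_index: tuple[tuple[int, ...], ...],
--     topological_order: tuple[int, ...],
-- ) -> tuple[tuple[tuple[int, ...], ...], tuple[dict[int, int], ...]]:
--     node_count = len(prerequisites_by_index)
--     ancestors_by_index: list[tuple[int, ...]] = [tuple() for _ in range(node_count)]
--     ancestor_distances_to_index: list[dict[int, int]] = [
--         {}
--         for _ in range(node_count)
--     ]
--
--     for node_index in topological_order: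
--         ancestor_distances: dict[int, int] = {}
--
--         for prerequisite_index in prerequisites_by_index[node_index]:
--             ancestor_distances[prerequisite_index] = 1
--
--             for ancestor_index, distance in ancestor_distances_to_index[
--                 prerequisite_index
--             ].items():
--                 candidate_distance = distance + 1
--                 previous_distance = ancestor_distances.get(ancestor_index)
--                 if previous_distance is None or candidate_distance < previous_distance:
--                     ancestor_distances[ancestor_index] = candidate_distance
--
--         ordered_ancestors = tuple(
--             sorted(
--                 ancestor_distances,
--                 key=lambda index: (ancestor_distances[index], index),
--             )
--         )
--         ancestors_by_index[node_index] = ordered_ancestors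
--         ancestor_distances_to_index[node_index] = ancestor_distances
--
--     return tuple(ancestors_by_index), tuple(ancestor_distances_to_index)
-- ===== SOURCE B (Python) =====
-- def _build_ancestor_maps(
--     prerequisites_by_index,
--     topological_order,
-- ):
--     node_count = len(prerequisites_by_index)
--     ancestors_by_index = [tuple()] * node_count
--     distance_maps = [{} for _ in range(node_count)]
--
--     for node_index in topological_order:
--         # one flat stream of (ancestor, candidate_distance) pairs
--         candidates = [
--             pair
--             for prerequisite_index in prerequisites_by_index[node_index]
--             for pair in [
--                 (prerequisite_index, 1),
--                 *((a, d + 1) for a, d in distance_maps[prerequisite_index].items()),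
--             ]
--         ]
--         # group every candidate distance by ancestor (first-seen key order), then take minima
--         reached = {}
--         for a, d in candidates:
--             reached[a] = reached.get(a, []) + [d]
--         merged = {a: min(ds) for a, ds in reached.items()}
--         ancestors_by_index[node_index] = tuple(
--             k for _, k in sorted((dist, k) for k, dist in merged.items())
--         )
--         distance_maps[node_index] = merged
--
--     return tuple(ancestors_by_index), tuple(distance_maps)
-- ===== Notes on version B (the rewrite author's own statement) =====
-- stated objective: alternative
-- what changed: Per node, A incrementally relaxes a distance dict with an unconditional direct-prerequisite insert and nested conditional min-updates; B instead flattens all (ancestor, distance) candidates into one stream, groups them by ancestor, and reduces each group with min, then sorts (distance, index) pairs instead of sorting keys under a key function.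
import Mathlib
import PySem

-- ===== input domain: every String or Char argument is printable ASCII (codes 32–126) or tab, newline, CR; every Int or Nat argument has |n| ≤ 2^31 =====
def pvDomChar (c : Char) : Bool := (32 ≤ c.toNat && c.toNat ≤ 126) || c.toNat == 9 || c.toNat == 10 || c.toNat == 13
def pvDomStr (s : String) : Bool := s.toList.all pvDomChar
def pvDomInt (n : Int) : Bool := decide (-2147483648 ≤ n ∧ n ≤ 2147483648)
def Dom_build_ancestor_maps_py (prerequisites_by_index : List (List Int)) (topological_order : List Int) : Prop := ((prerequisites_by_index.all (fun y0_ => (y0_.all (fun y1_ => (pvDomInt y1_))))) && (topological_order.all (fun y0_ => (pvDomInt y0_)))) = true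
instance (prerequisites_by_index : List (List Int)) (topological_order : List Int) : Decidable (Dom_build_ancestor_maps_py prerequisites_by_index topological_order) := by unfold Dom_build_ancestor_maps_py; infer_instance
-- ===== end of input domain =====

-- B replaces A's per-node incremental dict relaxation (unconditional "=1" insert + nested conditional
-- min-updates) by one flat candidate stream that is grouped by ancestor and reduced with min
-- (objective: alternative decomposition, same asymptotic cost).
-- A mutates no argument; equivalence is about the return value.

-- Python list element assignment xs[i] = v (negative index wraps); both Pythons only reach it after a
-- successful read at the same index, so the out-of-range branch (no change) is shared by both ports.
def pySetIdx {α : Type} (xs : List α) (i : Int) (v : α) : List α :=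
  let j : Int := if i < 0 then i + xs.length else i
  if 0 ≤ j ∧ j < xs.length then xs.set j.toNat v else xs

-- ===== PORT A =====
-- inner loop body of A: one (ancestor_index, distance) item of a prerequisite's stored map
def aInner (ad : PySem.Dict Int Int) (q : Int × Int) : PySem.Dict Int Int :=
  let candidate_distance := q.2 + 1
  match ad.get? q.1 with
  | none => ad.insert q.1 candidate_distance
  | some previous_distance =>
      if candidate_distance < previous_distance then ad.insert q.1 candidate_distance else ad

-- the ancestor_distances dict A builds for one node of topological_order
def aNode (prerequisites_by_index : List (List Int)) (dists : List (PySem.Dict Int Int))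
    (node_index : Int) : PySem.Dict Int Int :=
  ((PySem.List.pyGet? prerequisites_by_index node_index).getD []).foldl
    (fun ad prerequisite_index =>
      ((PySem.List.pyGet? dists prerequisite_index).getD PySem.Dict.empty).items.foldl
        aInner (ad.insert prerequisite_index 1))
    PySem.Dict.empty

-- one iteration of A's outer loop (sort key tuple (distance, index) is Python's lexicographic order = toLex;
-- ancestor_distances[index] inside the key never misses: index ranges over the dict's own keys, so getD 0 is exact)
def aStep (prerequisites_by_index : List (List Int))
    (st : List (List Int) × List (PySem.Dict Int Int)) (node_index : Int) :
    List (List Int) × List (PySem.Dict Int Int) :=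
  let ancestor_distances := aNode prerequisites_by_index st.2 node_index
  let ordered_ancestors := PySem.List.sorted ancestor_distances.keys
      (fun index => toLex (ancestor_distances.getD index 0, index)) false
  (pySetIdx st.1 node_index ordered_ancestors, pySetIdx st.2 node_index ancestor_distances)

def build_ancestor_maps_py (prerequisites_by_index : List (List Int)) (topological_order : List Int) :
    List (List Int) × (List (List (Int × Int))) :=
  let node_count := prerequisites_by_index.length
  let fin := topological_order.foldl (aStep prerequisites_by_index)
    ((List.range node_count).map (fun _ => ([] : List Int)),
     (List.range node_count).map (fun _ => (PySem.Dict.empty : PySem.Dict Int Int)))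
  (fin.1, fin.2.map PySem.Dict.items)

-- ===== PORT B =====
-- the flat candidate stream for one node: (prereq, 1) then its stored map shifted by one
def bCandList (prereqs : List Int) (dists : List (PySem.Dict Int Int)) : List (Int × Int) :=
  prereqs.flatMap (fun prerequisite_index =>
    (prerequisite_index, 1) ::
      ((PySem.List.pyGet? dists prerequisite_index).getD PySem.Dict.empty).items.map
        (fun q => (q.1, q.2 + 1)))

def bCandidates (prerequisites_by_index : List (List Int)) (dists : List (PySem.Dict Int Int))
    (node_index : Int) : List (Int × Int) :=
  bCandList ((PySem.List.pyGet? prerequisites_by_index node_index).getD []) dists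

-- group candidate distances by ancestor (reached[a] = reached.get(a, []) + [d] is Dict.modify a [] (· ++ [d])),
-- then take each group's min (min of a nonempty list: minD's default 0 is never used)
def bMerged (candidates : List (Int × Int)) : PySem.Dict Int Int :=
  let reached := candidates.foldl (fun r c => r.modify c.1 [] (· ++ [c.2])) PySem.Dict.empty
  reached.items.foldl (fun m p => m.insert p.1 (PySem.List.minD p.2 (fun x => x) 0)) PySem.Dict.empty

-- one iteration of B's loop (sorted on (dist, k) pairs without key = lexicographic = toLex)
def bStep (prerequisites_by_index : List (List Int))
    (st : List (List Int) × List (PySem.Dict Int Int)) (node_index : Int) :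
    List (List Int) × List (PySem.Dict Int Int) :=
  let merged := bMerged (bCandidates prerequisites_by_index st.2 node_index)
  let ordered := (PySem.List.sorted (merged.items.map (fun p => (p.2, p.1)))
      (fun x => toLex x) false).map (·.2)
  (pySetIdx st.1 node_index ordered, pySetIdx st.2 node_index merged)

def build_ancestor_maps_py_alt (prerequisites_by_index : List (List Int)) (topological_order : List Int) :
    List (List Int) × (List (List (Int × Int))) :=
  let node_count := prerequisites_by_index.length
  let fin := topological_order.foldl (bStep prerequisites_by_index)
    (List.replicate node_count ([] : List Int),
     (List.range node_count).map (fun _ => (PySem.Dict.empty : PySem.Dict Int Int)))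
  (fin.1, fin.2.map PySem.Dict.items)

-- ===== PRECONDITION & SPEC =====
-- Pre_ = exactly the inputs where Python A returns: every visited node index, and every prerequisite of a
-- visited node, must be a valid (possibly negative) index into the node_count-sized lists, else A raises IndexError.
def Pre_build_ancestor_maps_py (prerequisites_by_index : List (List Int)) (topological_order : List Int) : Prop :=
  ∀ i ∈ topological_order,
    (-(prerequisites_by_index.length : Int) ≤ i ∧ i < prerequisites_by_index.length) ∧
    ∀ p ∈ (PySem.List.pyGet? prerequisites_by_index i).getD [],
      -(prerequisites_by_index.length : Int) ≤ p ∧ p < prerequisites_by_index.length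

instance (prerequisites_by_index : List (List Int)) (topological_order : List Int) :
    Decidable (Pre_build_ancestor_maps_py prerequisites_by_index topological_order) := by
  unfold Pre_build_ancestor_maps_py; infer_instance

def pvWitness_build_ancestor_maps_py : List (List Int) × List Int := ([[], [0], [0, 1]], [0, 1, 2])

def Spec_build_ancestor_maps_py (prerequisites_by_index : List (List Int)) (topological_order : List Int)
    (out : List (List Int) × (List (List (Int × Int)))) : Prop :=
  out = build_ancestor_maps_py_alt prerequisites_by_index topological_order
instance (prerequisites_by_index : List (List Int)) (topological_order : List Int) (out : List (List Int) × (List (List (Int × Int)))) : Decidable (Spec_build_ancestor_maps_py prerequisites_by_index topological_order out) := by unfold Spec_build_ancestor_maps_py; infer_instance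

-- ===== CLAIM (what is proved, stated in full; the proofs are below) =====
def Claim_equal_build_ancestor_maps_py : Prop := ∀ (prerequisites_by_index : List (List Int)) (topological_order : List Int), Dom_build_ancestor_maps_py prerequisites_by_index topological_order → Pre_build_ancestor_maps_py prerequisites_by_index topological_order → Spec_build_ancestor_maps_py prerequisites_by_index topological_order (build_ancestor_maps_py prerequisites_by_index topological_order)

-- ===== LEMMAS AND PROOFS =====

-- the common shape both per-candidate folds reduce to: keep the smaller value, first occurrence fixes position
def minStep (ad : PySem.Dict Int Int) (c : Int × Int) : PySem.Dict Int Int :=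
  match ad.get? c.1 with
  | none => ad.insert c.1 c.2
  | some m => if c.2 < m then ad.insert c.1 c.2 else ad

def mstep (acc : Option Int) (v : Int) : Option Int :=
  some (match acc with | none => v | some m => if v < m then v else m)

theorem dict_insert_get_self {κ ν : Type} [BEq κ] [LawfulBEq κ] (d : PySem.Dict κ ν) (k : κ) (v : ν)
    (hnd : d.keys.Nodup) (h : d.get? k = some v) : d.insert k v = d := by
  have hc : d.contains k = true := by rw [PySem.Dict.contains_eq_isSome_get?, h]; rfl
  apply PySem.Dict.ext
  rw [PySem.Dict.items_insert_of_contains d v hc]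
  nth_rewrite 2 [← List.map_id d.items]
  apply List.map_congr_left
  intro p hp
  by_cases hk : (p.1 == k) = true
  · have hk' : p.1 = k := by exact_mod_cast eq_of_beq hk
    have hval : d.get? p.1 = some p.2 := PySem.Dict.get?_of_mem_items d (by simpa using hp) hnd
    rw [hk', h] at hval
    have : v = p.2 := Option.some_inj.mp hval
    simp [← hk', this]
  · simp [hk]

theorem mem_of_pyGet? {α : Type} {xs : List α} {i : Int} {x : α}
    (h : PySem.List.pyGet? xs i = some x) : x ∈ xs := by
  simp only [PySem.List.pyGet?, Option.bind_eq_some_iff] at h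
  obtain ⟨k, _, hk⟩ := h
  exact List.mem_of_getElem? hk

theorem insert_inv (ad : PySem.Dict Int Int) (k v : Int) (h1 : 1 ≤ v)
    (hnd : ad.keys.Nodup) (hv : ∀ q ∈ ad.items, 1 ≤ q.2) :
    (ad.insert k v).keys.Nodup ∧ ∀ q ∈ (ad.insert k v).items, 1 ≤ q.2 := by
  refine ⟨PySem.Dict.nodup_keys_insert ad k v hnd, ?_⟩
  intro q hq
  rcases (PySem.Dict.mem_items_insert ad k v q).mp hq with h | ⟨h, _⟩
  · rw [h]; exact h1
  · exact hv q h

theorem aInner_inv (l : List (Int × Int)) (hl : ∀ q ∈ l, 0 ≤ q.2) (ad : PySem.Dict Int Int)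
    (hnd : ad.keys.Nodup) (hv : ∀ q ∈ ad.items, 1 ≤ q.2) :
    (l.foldl aInner ad).keys.Nodup ∧ ∀ q ∈ (l.foldl aInner ad).items, 1 ≤ q.2 := by
  induction l generalizing ad with
  | nil => exact ⟨hnd, hv⟩
  | cons q t ih =>
    have hq0 : (0:Int) ≤ q.2 := hl q (by simp)
    have hstep : (aInner ad q).keys.Nodup ∧ ∀ r ∈ (aInner ad q).items, 1 ≤ r.2 := by
      unfold aInner
      cases h : ad.get? q.1 with
      | none => exact insert_inv ad q.1 (q.2 + 1) (by omega) hnd hv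
      | some m =>
        dsimp only
        split
        · exact insert_inv ad q.1 (q.2 + 1) (by omega) hnd hv
        · exact ⟨hnd, hv⟩
    simp only [List.foldl_cons]
    exact ih (fun r hr => hl r (by simp [hr])) _ hstep.1 hstep.2

-- A's nested loops over one node's prerequisites = one minStep fold over B's flat candidate stream
theorem afold_eq (P : List Int) (dists : List (PySem.Dict Int Int)) (ad : PySem.Dict Int Int)
    (hnd : ad.keys.Nodup) (hv : ∀ q ∈ ad.items, 1 ≤ q.2)
    (hD : ∀ d ∈ dists, ∀ q ∈ d.items, 1 ≤ q.2) :
    P.foldl (fun ad p =>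
        ((PySem.List.pyGet? dists p).getD PySem.Dict.empty).items.foldl aInner (ad.insert p 1)) ad
      = (bCandList P dists).foldl minStep ad := by
  induction P generalizing ad with
  | nil => rfl
  | cons p P ih =>
    have hitems : ∀ q ∈ ((PySem.List.pyGet? dists p).getD PySem.Dict.empty).items, 1 ≤ q.2 := by
      cases h : PySem.List.pyGet? dists p with
      | none => intro q hq; simp [PySem.Dict.empty] at hq
      | some d => exact fun q hq => hD d (mem_of_pyGet? h) q hq
    have hfirst : minStep ad (p, 1) = ad.insert p 1 := by
      unfold minStep
      cases h : ad.get? p with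
      | none => rfl
      | some m =>
        have h1m : 1 ≤ m := hv (p, m) (PySem.Dict.mem_items_of_get?_eq_some ad h)
        dsimp only
        split
        · rfl
        · have hm1 : m = 1 := by omega
          rw [dict_insert_get_self ad p 1 hnd (hm1 ▸ h)]
    have hmapfold : ∀ (X : PySem.Dict Int Int),
        (((PySem.List.pyGet? dists p).getD PySem.Dict.empty).items.map
            (fun q => (q.1, q.2 + 1))).foldl minStep X
          = ((PySem.List.pyGet? dists p).getD PySem.Dict.empty).items.foldl aInner X := by
      intro X
      rw [List.foldl_map]
      rfl
    simp only [List.foldl_cons, bCandList, List.flatMap_cons, List.foldl_append]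
    rw [hfirst, hmapfold]
    have hinv := aInner_inv ((PySem.List.pyGet? dists p).getD PySem.Dict.empty).items
      (fun q hq => by have := hitems q hq; omega) (ad.insert p 1)
      (PySem.Dict.nodup_keys_insert ad p 1 hnd)
      ((insert_inv ad p 1 le_rfl hnd hv).2)
    exact ih _ hinv.1 hinv.2

theorem minfold_get? (l : List (Int × Int)) (d : PySem.Dict Int Int) (a : Int) :
    (l.foldl minStep d).get? a
      = ((l.filter (fun c => c.1 == a)).map (·.2)).foldl mstep (d.get? a) := by
  induction l generalizing d with
  | nil => rfl
  | cons c t ih =>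
    simp only [List.foldl_cons, List.filter_cons]
    by_cases hk : (c.1 == a) = true
    · have hk' : c.1 = a := by exact_mod_cast eq_of_beq hk
      simp only [hk, if_pos, List.map_cons, List.foldl_cons]
      rw [ih]
      congr 1
      subst hk'
      unfold minStep mstep
      cases h : d.get? c.1 with
      | none => simp [PySem.Dict.get?_insert_self]
      | some m =>
        simp only [h]
        split
        · simp [PySem.Dict.get?_insert_self]
        · simp [h]
    · simp only [hk, Bool.false_eq_true, if_neg, not_false_eq_true]
      rw [ih]
      congr 1
      have hne : a ≠ c.1 := fun he => hk (by simp [he])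
      unfold minStep
      cases h : d.get? c.1 with
      | none => simp [PySem.Dict.get?_insert_of_ne d _ hne]
      | some m =>
        simp only [h]
        split
        · simp [PySem.Dict.get?_insert_of_ne d _ hne]
        · rfl

theorem minfold_keys (l : List (Int × Int)) (d : PySem.Dict Int Int) :
    (l.foldl minStep d).keys = PySem.Set.update d.keys (l.map (·.1)) := by
  induction l generalizing d with
  | nil => rfl
  | cons c t ih =>
    simp only [List.foldl_cons, List.map_cons, PySem.Set.update_cons]
    rw [ih]
    congr 1
    unfold minStep
    cases h : d.get? c.1 with
    | none =>
      have hnm : c.1 ∉ d.keys := (PySem.Dict.get?_eq_none_iff_not_mem_keys d c.1).mp h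
      have hc : d.contains c.1 = false := by rw [PySem.Dict.contains_eq_isSome_get?, h]; rfl
      rw [PySem.Dict.keys_insert_of_not_contains d _ hc, PySem.Set.add_of_not_mem hnm]
    | some m =>
      have hmem : c.1 ∈ d.keys := by
        by_contra hnm
        rw [(PySem.Dict.get?_eq_none_iff_not_mem_keys d c.1).mpr hnm] at h; cases h
      have hc : d.contains c.1 = true := by rw [PySem.Dict.contains_eq_isSome_get?, h]; rfl
      rw [PySem.Set.add_of_mem hmem]
      simp only [h]
      split
      · rw [PySem.Dict.keys_insert_of_contains d _ hc]
      · rfl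

theorem mstep_fold_eq_min? (vs : List Int) :
    vs.foldl mstep none = PySem.List.min? vs (fun x => x) := by
  unfold PySem.List.min?
  apply List.foldl_ext
  intro a b _
  cases a with
  | none => rfl
  | some m => simp only [mstep]; split <;> rfl

theorem bMerged_items (cand : List (Int × Int)) :
    (bMerged cand).items
      = (PySem.Set.ofList (cand.map (·.1))).map
          (fun k => (k, PySem.List.minD ((cand.filter (fun c => c.1 == k)).map (·.2)) (fun x => x) 0)) := by
  unfold bMerged
  set reached := cand.foldl (fun r c => r.modify c.1 [] (· ++ [c.2])) PySem.Dict.empty with hr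
  have hkeys : reached.keys = PySem.Set.ofList (cand.map (·.1)) := by
    rw [hr, PySem.Dict.keys_foldl_modify_key cand (·.1) [] (fun _ c => (· ++ [c.2])) PySem.Dict.empty]
    rw [PySem.Dict.keys_empty, PySem.Set.update_nil_left]
  have hnd : reached.keys.Nodup := by
    rw [hkeys]; exact PySem.Set.nodup_ofList _
  have hget : ∀ k, reached.getD k [] = (cand.filter (fun c => c.1 == k)).map (·.2) := by
    intro k
    rw [hr, PySem.Dict.getD_foldl_modify_append cand PySem.Dict.empty k]
    simp [PySem.Dict.getD_empty]
  have hitems : reached.items = reached.keys.map (fun k => (k, reached.getD k [])) :=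
    PySem.Dict.items_eq_map_keys reached hnd []
  have hfresh : ∀ p ∈ reached.items, (PySem.Dict.empty : PySem.Dict Int Int).contains p.1 = false := by
    intro p _; exact PySem.Dict.contains_empty _
  have hndk : (reached.items.map (·.1)).Nodup := hnd
  rw [PySem.Dict.items_foldl_insert_fresh reached.items (·.1)
    (fun p => PySem.List.minD p.2 (fun x => x) 0) PySem.Dict.empty hfresh hndk]
  rw [show (PySem.Dict.empty : PySem.Dict Int Int).items = [] from rfl, hitems, hkeys]
  simp only [List.nil_append, List.map_map]
  apply List.map_congr_left
  intro k _
  simp [Function.comp, hget k]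

theorem minfold_items (cand : List (Int × Int)) :
    ((cand.foldl minStep PySem.Dict.empty)).items
      = (PySem.Set.ofList (cand.map (·.1))).map
          (fun k => (k, PySem.List.minD ((cand.filter (fun c => c.1 == k)).map (·.2)) (fun x => x) 0)) := by
  have hkeys : (cand.foldl minStep PySem.Dict.empty).keys = PySem.Set.ofList (cand.map (·.1)) := by
    rw [minfold_keys, PySem.Dict.keys_empty, PySem.Set.update_nil_left]
  have hnd : (cand.foldl minStep PySem.Dict.empty).keys.Nodup := by
    rw [hkeys]; exact PySem.Set.nodup_ofList _
  rw [PySem.Dict.items_eq_map_keys _ hnd 0, hkeys]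
  apply List.map_congr_left
  intro k _
  rw [PySem.Dict.getD_eq_get?_getD, minfold_get?, PySem.Dict.get?_empty, mstep_fold_eq_min?]
  rfl

theorem aNode_eq_bMerged (pre : List (List Int)) (dists : List (PySem.Dict Int Int)) (i : Int)
    (hD : ∀ d ∈ dists, ∀ q ∈ d.items, 1 ≤ q.2) :
    aNode pre dists i = bMerged (bCandidates pre dists i) := by
  unfold aNode bCandidates
  rw [afold_eq _ dists PySem.Dict.empty (by simp [PySem.Dict.keys_empty])
    (by intro q hq; simp [PySem.Dict.empty] at hq) hD]
  apply PySem.Dict.ext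
  rw [minfold_items, bMerged_items]

theorem sorted_map_key {α β κ : Type} [LT κ] [DecidableLT κ] (l : List α) (f : α → β) (key : β → κ) :
    PySem.List.sorted (l.map f) key false = (PySem.List.sorted l (fun a => key (f a)) false).map f := by
  have hins : ∀ (x : α) (acc : List α),
      PySem.List.insertBy (fun a b => decide (key a < key b)) (f x) (acc.map f)
        = (PySem.List.insertBy (fun a b => decide (key (f a) < key (f b))) x acc).map f := by
    intro x acc
    induction acc with
    | nil => rfl
    | cons y ys ih =>
      simp only [List.map_cons, PySem.List.insertBy]
      split
      · rw [List.map_cons, List.map_cons]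
      · rw [List.map_cons, ih]
  have main : ∀ (l acc : List α),
      l.foldl (fun acc x => PySem.List.insertBy (fun a b => decide (key a < key b)) (f x) acc) (acc.map f)
        = (l.foldl (fun acc x => PySem.List.insertBy (fun a b => decide (key (f a) < key (f b))) x acc) acc).map f := by
    intro l
    induction l with
    | nil => intro acc; rfl
    | cons x xs ih =>
      intro acc
      simp only [List.foldl_cons]
      rw [hins x acc, ih]
  simp only [PySem.List.sorted, if_neg (by simp : ¬(false = true))]
  rw [List.foldl_map]
  simpa using main l []

-- A sorts the keys by (distance, index); B sorts the swapped items and projects: the same list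
theorem ordered_eq (d : PySem.Dict Int Int) (hnd : d.keys.Nodup) :
    (PySem.List.sorted (d.items.map (fun p => (p.2, p.1))) (fun x => toLex x) false).map (·.2)
      = PySem.List.sorted d.keys (fun index => toLex (d.getD index 0, index)) false := by
  rw [PySem.Dict.items_eq_map_keys d hnd 0, List.map_map]
  rw [sorted_map_key d.keys ((fun p => (p.2, p.1)) ∘ (fun k => (k, d.getD k 0))) (fun x => toLex x)]
  rw [List.map_map]
  have hcomp : ((fun x : Int × Int => x.2) ∘ (fun p : Int × Int => (p.2, p.1)) ∘ (fun k : Int => (k, d.getD k 0)))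
      = fun k => k := rfl
  rw [hcomp, List.map_id_fun', id_eq]
  rfl

theorem cand_vals (pre : List (List Int)) (dists : List (PySem.Dict Int Int)) (i : Int)
    (hD : ∀ d ∈ dists, ∀ q ∈ d.items, 1 ≤ q.2) :
    ∀ c ∈ bCandidates pre dists i, 1 ≤ c.2 := by
  intro c hc
  unfold bCandidates bCandList at hc
  rw [List.mem_flatMap] at hc
  obtain ⟨p, _, hp⟩ := hc
  rw [List.mem_cons] at hp
  rcases hp with rfl | h
  · exact le_refl 1
  · rw [List.mem_map] at h
    obtain ⟨q, hq, rfl⟩ := h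
    cases h2 : PySem.List.pyGet? dists p with
    | none => rw [h2] at hq; simp [PySem.Dict.empty] at hq
    | some dd =>
      rw [h2] at hq
      have := hD dd (mem_of_pyGet? h2) q hq
      dsimp only
      omega

theorem min?_fold_ge_one (vs : List Int) (m : Int) (hm : 1 ≤ m) (h : ∀ v ∈ vs, 1 ≤ v) :
    ∃ r, vs.foldl mstep (some m) = some r ∧ 1 ≤ r := by
  induction vs generalizing m with
  | nil => exact ⟨m, rfl, hm⟩
  | cons v t ih =>
    simp only [List.foldl_cons]
    have hv : (1:Int) ≤ v := h v (by simp)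
    by_cases hlt : v < m
    · have hstep : mstep (some m) v = some v := by simp [mstep, hlt]
      rw [hstep]
      exact ih v hv (fun x hx => h x (by simp [hx]))
    · have hstep : mstep (some m) v = some m := by simp [mstep, hlt]
      rw [hstep]
      exact ih m hm (fun x hx => h x (by simp [hx]))

theorem mstep_none (v : Int) : mstep none v = some v := rfl

theorem minD_ge_one (vs : List Int) (hne : vs ≠ []) (h : ∀ v ∈ vs, 1 ≤ v) :
    1 ≤ PySem.List.minD vs (fun x => x) 0 := by
  cases vs with
  | nil => exact absurd rfl hne
  | cons v t =>
    obtain ⟨r, hr, h1⟩ := min?_fold_ge_one t v (h v (by simp)) (fun x hx => h x (by simp [hx]))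
    have hm : PySem.List.min? (v :: t) (fun x => x) = some r := by
      rw [← mstep_fold_eq_min?, List.foldl_cons, mstep_none, hr]
    unfold PySem.List.minD
    rw [hm]
    exact h1

theorem merged_vals (cand : List (Int × Int)) (hc : ∀ c ∈ cand, 1 ≤ c.2) :
    ∀ q ∈ (bMerged cand).items, 1 ≤ q.2 := by
  intro q hq
  rw [bMerged_items] at hq
  rw [List.mem_map] at hq
  obtain ⟨k, hk, rfl⟩ := hq
  have hk' : k ∈ cand.map (·.1) := (PySem.Set.mem_ofList _ _).mp hk
  rw [List.mem_map] at hk'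
  obtain ⟨c, hcmem, rfl⟩ := hk'
  apply minD_ge_one
  · have : c ∈ cand.filter (fun x => x.1 == c.1) := by
      rw [List.mem_filter]; exact ⟨hcmem, by simp⟩
    intro hemp
    rw [List.map_eq_nil_iff] at hemp
    rw [hemp] at this
    cases this
  · intro v hv
    rw [List.mem_map] at hv
    obtain ⟨x, hx, rfl⟩ := hv
    exact hc x (List.mem_of_mem_filter hx)

theorem bMerged_nodup (cand : List (Int × Int)) : (bMerged cand).keys.Nodup := by
  have : (bMerged cand).keys = (bMerged cand).items.map (·.1) := rfl
  rw [this, bMerged_items, List.map_map]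
  have : ((fun p => p.1) ∘ (fun k => (k, PySem.List.minD ((cand.filter (fun c => c.1 == k)).map (·.2)) (fun x => x) 0)))
      = fun (k : Int) => k := rfl
  rw [this, List.map_id_fun']
  exact PySem.Set.nodup_ofList _

theorem step_eq (pre : List (List Int)) (st : List (List Int) × List (PySem.Dict Int Int)) (i : Int)
    (hD : ∀ d ∈ st.2, ∀ q ∈ d.items, 1 ≤ q.2) :
    aStep pre st i = bStep pre st i := by
  simp only [aStep, bStep]
  rw [aNode_eq_bMerged pre st.2 i hD]
  rw [ordered_eq _ (bMerged_nodup _)]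

theorem step_inv (pre : List (List Int)) (st : List (List Int) × List (PySem.Dict Int Int)) (i : Int)
    (hD : ∀ d ∈ st.2, ∀ q ∈ d.items, 1 ≤ q.2) :
    ∀ d ∈ (bStep pre st i).2, ∀ q ∈ d.items, 1 ≤ q.2 := by
  intro d hd
  have hmem : d ∈ st.2 ∨ d = bMerged (bCandidates pre st.2 i) := by
    unfold bStep pySetIdx at hd
    dsimp only at hd
    split at hd <;> split at hd <;>
      first
        | exact List.mem_or_eq_of_mem_set hd
        | exact Or.inl hd
  rcases hmem with h | rfl
  · exact hD d h
  · exact merged_vals _ (cand_vals pre st.2 i hD)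

theorem fold_eq (pre : List (List Int)) (topo : List Int)
    (st : List (List Int) × List (PySem.Dict Int Int))
    (hD : ∀ d ∈ st.2, ∀ q ∈ d.items, 1 ≤ q.2) :
    topo.foldl (aStep pre) st = topo.foldl (bStep pre) st := by
  induction topo generalizing st with
  | nil => rfl
  | cons i t ih =>
    simp only [List.foldl_cons]
    rw [step_eq pre st i hD]
    exact ih _ (step_inv pre st i hD)

-- ===== VERDICT (by name: the statement is the Claim_ definition above) =====
theorem build_ancestor_maps_py_spec : Claim_equal_build_ancestor_maps_py := by
  intro pre topo _ _
  simp only [Spec_build_ancestor_maps_py, build_ancestor_maps_py, build_ancestor_maps_py_alt]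
  rw [fold_eq]
  · simp [List.map_const', List.length_range]
  · intro d hd
    simp only [List.mem_map] at hd
    obtain ⟨_, _, rfl⟩ := hd
    intro q hq
    simp [PySem.Dict.empty] at hq
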